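-- pv_equiv track=rewrite | github.com/rbrthogan/idea | idea/swiss_tournament.py | select_swiss_bye
-- ===== SOURCE A (Python) =====
-- from typing import Dict, List, Optional, Set, Tuple
--
-- def select_swiss_bye(ordered_indices: List[int], bye_counts: Dict[int, int]) -> Optional[int]:
--     """
--     Select a bye candidate for an odd-sized Swiss round.
--
--     Preference order:
--     1) Fewest byes so far
--     2) Lowest-ranked (last in ordered list)
--     """
--     if not ordered_indices:
--         return None
--
--     min_byes = min(bye_counts.get(idx, 0) for idx in ordered_indices)
--     for idx in reversed(ordered_indices):
--         if bye_counts.get(idx, 0) == min_byes: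
--             return idx
--     return ordered_indices[-1]
-- ===== SOURCE B (Python) =====
-- def select_swiss_bye(ordered_indices, bye_counts):
--     """Single forward pass: keep the best candidate (fewest byes, ties -> later
--     position, i.e. lowest-ranked) in an accumulator instead of A's two passes."""
--     if not ordered_indices:
--         return None
--     best = ordered_indices[0]
--     best_byes = bye_counts.get(best, 0)
--     for idx in ordered_indices[1:]:
--         b = bye_counts.get(idx, 0)
--         if b <= best_byes:
--             best, best_byes = idx, b
--     return best
-- ===== Notes on version B (the rewrite author's own statement) =====
-- stated objective: simpler
-- what changed: Replaced A's two passes (a min over all bye counts, then a reversed scan for the first index attaining it) by one forward pass keeping a running best index and its bye count, with '<=' so later ties win exactly as A's reversed scan does.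
import Mathlib
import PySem

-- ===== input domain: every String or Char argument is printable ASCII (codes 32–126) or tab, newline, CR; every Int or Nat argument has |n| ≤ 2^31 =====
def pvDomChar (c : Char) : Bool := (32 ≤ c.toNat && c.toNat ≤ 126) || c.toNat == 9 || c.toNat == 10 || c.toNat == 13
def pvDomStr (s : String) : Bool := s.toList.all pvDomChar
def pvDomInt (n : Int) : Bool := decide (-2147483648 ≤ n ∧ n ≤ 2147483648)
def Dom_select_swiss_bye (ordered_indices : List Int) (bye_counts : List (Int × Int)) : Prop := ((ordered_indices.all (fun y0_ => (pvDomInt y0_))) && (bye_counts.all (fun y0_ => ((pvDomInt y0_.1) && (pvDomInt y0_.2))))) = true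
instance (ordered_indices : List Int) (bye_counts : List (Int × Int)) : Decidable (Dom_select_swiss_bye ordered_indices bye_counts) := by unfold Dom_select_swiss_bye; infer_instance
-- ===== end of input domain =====

-- B replaces A's two passes (min of bye counts, then reversed scan) by one forward
-- pass with a running best; same return value, objective: simpler.

-- shared helper: bye_counts.get(idx, 0) (dict lookup = first match in the assoc list)
def byeGet (bye_counts : List (Int × Int)) (idx : Int) : Int :=
  PySem.Dict.getD (PySem.Dict.mk bye_counts) idx 0

-- ===== PORT A =====
def select_swiss_bye (ordered_indices : List Int) (bye_counts : List (Int × Int)) : Option Int :=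
  match ordered_indices with
  | [] => none
  | h :: t =>
    -- min_byes = min(bye_counts.get(idx, 0) for idx in ordered_indices): running min
    let min_byes := (t.map (fun idx => byeGet bye_counts idx)).foldl min (byeGet bye_counts h)
    -- for idx in reversed(ordered_indices): if …: return idx
    match (h :: t).reverse.find? (fun idx => byeGet bye_counts idx == min_byes) with
    | some idx => some idx
    | none => PySem.List.pyGet? (h :: t) (-1)  -- return ordered_indices[-1]

-- ===== PORT B =====
def select_swiss_bye_alt (ordered_indices : List Int) (bye_counts : List (Int × Int)) : Option Int :=
  match ordered_indices with
  | [] => none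
  | h :: t =>
    some ((t.foldl (fun (p : Int × Int) idx =>
      let b := byeGet bye_counts idx
      if b ≤ p.2 then (idx, b) else p) (h, byeGet bye_counts h)).1)

-- ===== PRECONDITION & SPEC =====
def Spec_select_swiss_bye (ordered_indices : List Int) (bye_counts : List (Int × Int)) (out : Option Int) : Prop := out = select_swiss_bye_alt ordered_indices bye_counts
instance (ordered_indices : List Int) (bye_counts : List (Int × Int)) (out : Option Int) : Decidable (Spec_select_swiss_bye ordered_indices bye_counts out) := by unfold Spec_select_swiss_bye; infer_instance

-- ===== CLAIM (what is proved, stated in full; the proofs are below) =====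
def Claim_equal_select_swiss_bye : Prop := ∀ (ordered_indices : List Int) (bye_counts : List (Int × Int)), Dom_select_swiss_bye ordered_indices bye_counts → Spec_select_swiss_bye ordered_indices bye_counts (select_swiss_bye ordered_indices bye_counts)

-- ===== LEMMAS AND PROOFS =====

-- Core lemma: the reversed-scan find? for the running minimum (A's shape) returns
-- exactly B's forward-fold best element.
theorem find?_rev_eq_fold (g : Int → Int) :
    ∀ (t : List Int) (h : Int),
      (h :: t).reverse.find? (fun idx => g idx == (t.map g).foldl min (g h)) =
        some ((t.foldl (fun (p : Int × Int) idx =>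
          if g idx ≤ p.2 then (idx, g idx) else p) (h, g h)).1) := by
  intro t
  induction t with
  | nil => intro h; simp
  | cons a t' ih =>
    intro h
    have hstep : (if g a ≤ g h then (a, g a) else (h, g h))
        = ((if g a ≤ g h then a else h), g (if g a ≤ g h then a else h)) := by
      by_cases hc : g a ≤ g h <;> simp [hc]
    have hmin : min (g h) (g a) = g (if g a ≤ g h then a else h) := by
      by_cases hc : g a ≤ g h
      · simp only [hc, if_true, min_def]; split_ifs <;> omega
      · simp only [hc, if_false, min_def]; split_ifs <;> omega
    set h' := if g a ≤ g h then a else h with hh'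
    have ihh := ih h'
    -- rewrite both sides to the (h', t') shape
    have lhsfold : ((a :: t').foldl (fun (p : Int × Int) idx =>
        if g idx ≤ p.2 then (idx, g idx) else p) (h, g h))
        = (t'.foldl (fun (p : Int × Int) idx =>
        if g idx ≤ p.2 then (idx, g idx) else p) (h', g h')) := by
      simp only [List.foldl_cons, hstep]
    have hM : ((a :: t').map g).foldl min (g h) = (t'.map g).foldl min (g h') := by
      simp only [List.map_cons, List.foldl_cons, hmin]
    rw [hM, lhsfold]
    -- now compare the find? sides
    have hsplit : (h :: a :: t').reverse = t'.reverse ++ [a, h] := by simp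
    have hsplit' : (h' :: t').reverse = t'.reverse ++ [h'] := by simp
    rw [hsplit]
    rw [hsplit'] at ihh
    set M := (t'.map g).foldl min (g h') with hMdef
    rw [List.find?_append] at ihh ⊢
    cases hfs : t'.reverse.find? (fun idx => g idx == M) with
    | some x =>
      rw [hfs] at ihh
      simpa using ihh
    | none =>
      rw [hfs] at ihh
      simp only [Option.none_or] at ihh ⊢
      -- from ihh : find? on [h'] = some fold-result; extract g h' = M and the value
      have hgh' : (g h' == M) = true := by
        cases hb : (g h' == M) with
        | false => rw [List.find?, hb, List.find?] at ihh; exact absurd ihh (by simp)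
        | true => rfl
      have hval : h' = (t'.foldl (fun (p : Int × Int) idx =>
          if g idx ≤ p.2 then (idx, g idx) else p) (h', g h')).1 := by
        rw [List.find?, hgh'] at ihh
        exact (Option.some.inj ihh)
      rw [← hval]
      by_cases hc : g a ≤ g h
      · -- h' = a, and g a == M holds
        have ha : h' = a := by simp [hh', hc]
        have hat : (g a == M) = true := by rw [← ha]; exact hgh'
        rw [List.find?, hat, ha]
      · -- h' = h, g h < g a, and M = g h so g a ≠ M
        have hhh : h' = h := by simp [hh', hc]
        have hMh : M = g h := by
          have := of_decide_eq_true hgh'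
          rw [hhh] at this; omega
        have hane : (g a == M) = false := by
          rw [hMh]; simp; omega
        have hheq : (g h == M) = true := by rw [hMh]; simp
        rw [List.find?, hane, List.find?, hheq, hhh]

-- ===== VERDICT (by name: the statement is the Claim_ definition above) =====
theorem select_swiss_bye_spec : Claim_equal_select_swiss_bye := by
  intro ordered_indices bye_counts _
  unfold Spec_select_swiss_bye select_swiss_bye select_swiss_bye_alt
  cases ordered_indices with
  | nil => rfl
  | cons h t =>
    simp only
    rw [find?_rev_eq_fold (byeGet bye_counts) t h]
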